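-- pv_equiv track=rewrite | github.com/DanielBrit0/Organizador-de-Horarios-UFRB | Organizador_de_Horarios_UFRB.py | interpretar_codigo_bloco
-- ===== SOURCE A (Python) =====
-- dias_semana = {'2': 'SEGUNDA', '3': 'TERÇA', '4': 'QUARTA', '5': 'QUINTA', '6': 'SEXTA', '7': 'SÁBADO'}
--
-- turnos = {'M': 'Manhã', 'T': 'Tarde', 'N': 'Noite'}
--
-- horarios_turno = {
--     'M': {'1': '7 às 8', '2': '8 às 9', '3': '9 às 10', '4': '10 às 11', '5': '11 às 12'},
--     'T': {'1': '13 às 14', '2': '14 às 15', '3': '15 às 16', '4': '16 às 17', '5': '17 às 18'},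
--     'N': {'1': '18:30 às 19:30', '2': '19:30 às 20:30', '3': '20:30 às 21:30', '4': '21:30 às 22:30'}
-- }
--
-- def interpretar_codigo_bloco(bloco):
--     for i, c in enumerate(bloco):
--         if c in turnos:
--             dias = [dias_semana[d] for d in bloco[:i] if d in dias_semana]
--             turno = bloco[i]
--             horarios = [horarios_turno[turno][h] for h in bloco[i+1:] if h in horarios_turno[turno]]
--             return dias, horarios
--     raise ValueError("Turno não identificado no bloco.")
-- ===== SOURCE B (Python) =====
-- dias_semana = {'2': 'SEGUNDA', '3': 'TERÇA', '4': 'QUARTA', '5': 'QUINTA', '6': 'SEXTA', '7': 'SÁBADO'}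
--
-- turnos = {'M': 'Manhã', 'T': 'Tarde', 'N': 'Noite'}
--
-- horarios_turno = {
--     'M': {'1': '7 às 8', '2': '8 às 9', '3': '9 às 10', '4': '10 às 11', '5': '11 às 12'},
--     'T': {'1': '13 às 14', '2': '14 às 15', '3': '15 às 16', '4': '16 às 17', '5': '17 às 18'},
--     'N': {'1': '18:30 às 19:30', '2': '19:30 às 20:30', '3': '20:30 às 21:30', '4': '21:30 às 22:30'}
-- }
--
-- def interpretar_codigo_bloco(bloco):
--     # single state-machine pass: collect days until the first turno letter,
--     # then collect time-slots of that turno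
--     turno = None
--     dias = []
--     horarios = []
--     for c in bloco:
--         if turno is None:
--             if c in turnos:
--                 turno = c
--             elif c in dias_semana:
--                 dias.append(dias_semana[c])
--         elif c in horarios_turno[turno]:
--             horarios.append(horarios_turno[turno][c])
--     if turno is None:
--         raise ValueError("Turno não identificado no bloco.")
--     return dias, horarios
-- ===== Notes on version B (the rewrite author's own statement) =====
-- stated objective: simpler
-- what changed: Replaced the enumerate-then-double-slice structure (find index of the turno letter, then two list comprehensions over bloco[:i] and bloco[i+1:]) with a single linear state-machine pass that switches mode at the first turno letter while accumulating days and time-slots.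
import Mathlib
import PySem

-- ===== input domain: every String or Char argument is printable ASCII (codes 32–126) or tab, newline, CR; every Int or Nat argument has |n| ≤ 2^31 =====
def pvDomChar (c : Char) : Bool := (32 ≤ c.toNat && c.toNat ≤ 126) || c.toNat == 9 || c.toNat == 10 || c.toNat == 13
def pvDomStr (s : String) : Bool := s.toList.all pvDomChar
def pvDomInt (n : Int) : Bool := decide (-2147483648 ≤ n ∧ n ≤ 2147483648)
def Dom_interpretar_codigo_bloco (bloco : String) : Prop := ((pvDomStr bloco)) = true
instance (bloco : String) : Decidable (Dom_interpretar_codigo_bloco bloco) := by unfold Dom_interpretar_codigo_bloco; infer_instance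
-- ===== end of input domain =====

-- B replaces A's locate-index-then-slice-twice structure by one state-machine pass (objective: simpler).
-- Both programs raise ValueError when bloco has no turno letter; Pre_ excludes those inputs.

-- module-level constants shared by both Pythons, as membership test + lookup
def isTurno (c : Char) : Bool := c == 'M' || c == 'T' || c == 'N'

def diaSemana? (c : Char) : Option String :=
  match c with
  | '2' => some "SEGUNDA" | '3' => some "TERÇA" | '4' => some "QUARTA"
  | '5' => some "QUINTA" | '6' => some "SEXTA" | '7' => some "SÁBADO"
  | _ => none

def horarioTurno? (t : Char) (c : Char) : Option String :=
  match t, c with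
  | 'M', '1' => some "7 às 8" | 'M', '2' => some "8 às 9" | 'M', '3' => some "9 às 10"
  | 'M', '4' => some "10 às 11" | 'M', '5' => some "11 às 12"
  | 'T', '1' => some "13 às 14" | 'T', '2' => some "14 às 15" | 'T', '3' => some "15 às 16"
  | 'T', '4' => some "16 às 17" | 'T', '5' => some "17 às 18"
  | 'N', '1' => some "18:30 às 19:30" | 'N', '2' => some "19:30 às 20:30"
  | 'N', '3' => some "20:30 às 21:30" | 'N', '4' => some "21:30 às 22:30"
  | _, _ => none

-- ===== PORT A =====
-- A's loop: enumerate bloco; at the first turno letter build the two comprehensions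
-- over the slices bloco[:i] and bloco[i+1:]; none = the trailing 'raise ValueError'.
def aLoop (rest : List Char) (i : Nat) (full : List Char) :
    Option (List String × List String) :=
  match rest with
  | [] => none
  | c :: rest' =>
    if isTurno c then
      some ((full.take i).filterMap diaSemana?, (full.drop (i + 1)).filterMap (horarioTurno? c))
    else
      aLoop rest' (i + 1) full

def interpretar_codigo_bloco (bloco : String) : List String × List String :=
  match aLoop bloco.toList 0 bloco.toList with
  | some r => r
  | none => ([], [])   -- Python raises ValueError here; excluded by Pre_

-- ===== PORT B =====
-- B's loop body: state (turno, dias, horarios), one step per character.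
def bStep (st : Option Char × List String × List String) (c : Char) :
    Option Char × List String × List String :=
  match st with
  | (none, ds, hs) =>
    if isTurno c then (some c, ds, hs)
    else
      match diaSemana? c with
      | some d => (none, ds ++ [d], hs)
      | none => (none, ds, hs)
  | (some t, ds, hs) =>
    match horarioTurno? t c with
    | some h => (some t, ds, hs ++ [h])
    | none => (some t, ds, hs)

def interpretar_codigo_bloco_alt (bloco : String) : List String × List String :=
  match bloco.toList.foldl bStep (none, [], []) with
  | (none, _, _) => ([], [])   -- Python raises ValueError here; excluded by Pre_
  | (some _, ds, hs) => (ds, hs)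

-- ===== PRECONDITION & SPEC =====
-- Pre_ excludes exactly the blocos with no turno letter M/T/N, on which both Pythons raise ValueError.
def Pre_interpretar_codigo_bloco (bloco : String) : Prop := bloco.toList.any isTurno = true
instance (bloco : String) : Decidable (Pre_interpretar_codigo_bloco bloco) := by
  unfold Pre_interpretar_codigo_bloco; infer_instance

def pvWitness_interpretar_codigo_bloco : String := "24T34"

def Spec_interpretar_codigo_bloco (bloco : String) (out : List String × List String) : Prop := out = interpretar_codigo_bloco_alt bloco
instance (bloco : String) (out : List String × List String) : Decidable (Spec_interpretar_codigo_bloco bloco out) := by unfold Spec_interpretar_codigo_bloco; infer_instance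

-- ===== CLAIM (what is proved, stated in full; the proofs are below) =====
def Claim_equal_interpretar_codigo_bloco : Prop := ∀ (bloco : String), Dom_interpretar_codigo_bloco bloco → Pre_interpretar_codigo_bloco bloco → Spec_interpretar_codigo_bloco bloco (interpretar_codigo_bloco bloco)

-- ===== LEMMAS AND PROOFS =====

lemma bfold_none (l : List Char) (ds hs : List String)
    (h : ∀ c ∈ l, isTurno c = false) :
    List.foldl bStep (none, ds, hs) l = (none, ds ++ l.filterMap diaSemana?, hs) := by
  induction l generalizing ds with
  | nil => simp
  | cons c l ih =>
    have hc := h c (by simp)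
    simp only [List.foldl_cons, bStep, hc, Bool.false_eq_true, if_false]
    cases hd : diaSemana? c with
    | none => simpa [hd, List.filterMap_cons] using ih ds (fun c hc => h c (by simp [hc]))
    | some d =>
      rw [ih (ds ++ [d]) (fun c hc => h c (by simp [hc]))]
      simp [hd]

lemma bfold_some (l : List Char) (t : Char) (ds hs : List String) :
    List.foldl bStep (some t, ds, hs) l = (some t, ds, hs ++ l.filterMap (horarioTurno? t)) := by
  induction l generalizing hs with
  | nil => simp
  | cons c l ih =>
    simp only [List.foldl_cons, bStep]
    cases hh : horarioTurno? t c with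
    | none => simpa [hh, List.filterMap_cons] using ih hs
    | some h => rw [ih (hs ++ [h])]; simp [hh]

lemma aLoop_eq_fold (rest pre : List Char)
    (hpre : ∀ c ∈ pre, isTurno c = false)
    (hrest : rest.any isTurno = true) :
    ∃ t ds hs,
      aLoop rest pre.length (pre ++ rest) = some (ds, hs) ∧
      List.foldl bStep (none, [], []) (pre ++ rest) = (some t, ds, hs) := by
  induction rest generalizing pre with
  | nil => simp at hrest
  | cons c rest ih =>
    by_cases hc : isTurno c = true
    · refine ⟨c, pre.filterMap diaSemana?, rest.filterMap (horarioTurno? c), ?_, ?_⟩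
      · have h1 : (pre ++ c :: rest).take pre.length = pre := by simp
        have h2 : (pre ++ c :: rest).drop (pre.length + 1) = rest := by
          rw [show pre ++ c :: rest = (pre ++ [c]) ++ rest by simp,
              show pre.length + 1 = (pre ++ [c]).length by simp, List.drop_left]
        simp [aLoop, hc, h1, h2]
      · rw [List.foldl_append, bfold_none pre [] [] hpre]
        simp only [List.foldl_cons, bStep, hc, if_true]
        simpa using bfold_some rest c _ []
    · simp only [List.any_cons, hc, Bool.false_or] at hrest
      have hpre' : ∀ d ∈ pre ++ [c], isTurno d = false := by
        intro d hd
        rcases List.mem_append.mp hd with h | h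
        · exact hpre d h
        · simp at h; subst h; simpa using hc
      have := ih (pre ++ [c]) hpre' hrest
      simpa [aLoop, hc, List.append_assoc] using this

-- ===== VERDICT (by name: the statement is the Claim_ definition above) =====
theorem interpretar_codigo_bloco_spec : Claim_equal_interpretar_codigo_bloco := by
  intro bloco _ hpre
  unfold Spec_interpretar_codigo_bloco interpretar_codigo_bloco interpretar_codigo_bloco_alt
  obtain ⟨t, ds, hs, hA, hB⟩ := aLoop_eq_fold bloco.toList [] (by simp) hpre
  simp only [List.nil_append] at hA hB
  rw [show ([] : List Char).length = 0 from rfl] at hA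
  rw [hA, hB]
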